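-- pv_equiv track=rewrite | github.com/zychen423/UHop | script/preprocess/extract_tail_entity_type.py | check_if_type
-- ===== SOURCE A (Python) =====
-- from collections import defaultdict
--
-- def check_if_type(types_list):
--     type_count = defaultdict(int)
--     for types in types_list:
--         for type in types:
--             type_count[type] += 1
--     for type, count in type_count.items():
--         if count >= 500*0.95:
--             return type
--     return 'no_type'
-- ===== SOURCE B (Python) =====
-- def check_if_type(types_list):
--     seen = set()
--     for types in types_list:
--         for t in types:
--             if t not in seen:
--                 seen.add(t)
--                 if sum(ts.count(t) for ts in types_list) >= 500*0.95:
--                     return t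
--     return 'no_type'
-- ===== Notes on version B (the rewrite author's own statement) =====
-- stated objective: alternative
-- what changed: B builds no frequency table at all: it walks the nested input once with a 'seen' set and, at each first occurrence of a type, counts that type's total occurrences on demand by summing ts.count(t) over the sublists, returning the first type that reaches the threshold; A instead builds a full defaultdict count table and scans its items.
import Mathlib
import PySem

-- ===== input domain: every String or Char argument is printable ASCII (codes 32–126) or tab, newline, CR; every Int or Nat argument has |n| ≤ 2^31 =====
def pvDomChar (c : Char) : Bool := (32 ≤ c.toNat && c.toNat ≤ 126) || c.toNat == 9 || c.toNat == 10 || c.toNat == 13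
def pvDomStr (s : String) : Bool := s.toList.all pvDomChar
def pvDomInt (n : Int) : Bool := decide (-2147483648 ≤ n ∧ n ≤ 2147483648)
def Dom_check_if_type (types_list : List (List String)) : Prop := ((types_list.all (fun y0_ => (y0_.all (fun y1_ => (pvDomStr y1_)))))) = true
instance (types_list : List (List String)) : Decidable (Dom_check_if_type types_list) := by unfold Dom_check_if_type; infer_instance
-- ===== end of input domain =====

-- B builds no frequency table: it walks the nested input with a 'seen' set and, at each
-- first occurrence of a type, counts that type's total occurrences on demand (alternative
-- decomposition; same result, not claimed faster).

-- ===== PORT A =====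
-- 'for type, count in type_count.items(): if count >= 500*0.95: return type'
-- (counts are ints, so 'count >= 475.0' is exactly '475 ≤ count')
def checkItemsLoop : List (String × Int) → String
  | [] => "no_type"
  | (t, c) :: rest => if (475 : Int) ≤ c then t else checkItemsLoop rest

def check_if_type (types_list : List (List String)) : String :=
  let type_count : PySem.Dict String Int :=
    types_list.foldl
      (fun d types => types.foldl (fun d t => d.modify t 0 (· + 1)) d)
      PySem.Dict.empty
  checkItemsLoop type_count.items

-- ===== PORT B =====
-- 'sum(ts.count(t) for ts in types_list)'
def bTotalCount (types_list : List (List String)) (t : String) : Int :=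
  (types_list.map (fun ts => (PySem.List.count ts t : Int))).sum

-- the inner 'for t in types' loop: early return via Option, threading the seen set
def bInnerLoop (types_list : List (List String)) :
    List String → PySem.Set String → Option String × PySem.Set String
  | [], seen => (none, seen)
  | t :: rest, seen =>
    if PySem.Set.contains seen t then bInnerLoop types_list rest seen
    else
      let seen' := PySem.Set.add seen t
      if (475 : Int) ≤ bTotalCount types_list t then (some t, seen')
      else bInnerLoop types_list rest seen'

-- the outer 'for types in types_list' loop
def bOuterLoop (types_list : List (List String)) :
    List (List String) → PySem.Set String → Option String
  | [], _ => none
  | types :: rest, seen =>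
    match bInnerLoop types_list types seen with
    | (some t, _) => some t
    | (none, seen') => bOuterLoop types_list rest seen'

def check_if_type_alt (types_list : List (List String)) : String :=
  match bOuterLoop types_list types_list PySem.Set.empty with
  | some t => t
  | none => "no_type"

-- ===== PRECONDITION & SPEC =====
def Spec_check_if_type (types_list : List (List String)) (out : String) : Prop := out = check_if_type_alt types_list
instance (types_list : List (List String)) (out : String) : Decidable (Spec_check_if_type types_list out) := by unfold Spec_check_if_type; infer_instance

-- ===== CLAIM (what is proved, stated in full; the proofs are below) =====
def Claim_equal_check_if_type : Prop := ∀ (types_list : List (List String)), Dom_check_if_type types_list → Spec_check_if_type types_list (check_if_type types_list)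

-- ===== LEMMAS AND PROOFS =====

-- on-demand counting = counting in the flattened list
theorem bTotalCount_eq (types_list : List (List String)) (t : String) :
    bTotalCount types_list t = (types_list.flatten.count t : Int) := by
  unfold bTotalCount
  induction types_list with
  | nil => simp
  | cons ts rest ih =>
    simp only [List.map_cons, List.sum_cons, List.flatten_cons, List.count_append,
      PySem.List.count_eq] at ih ⊢
    rw [ih]
    push_cast
    ring

-- B's predicate
def bPred (types_list : List (List String)) (t : String) : Bool :=
  decide ((475 : Int) ≤ bTotalCount types_list t)

-- every foldl of Set.add extends the accumulator (new elements are appended)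
theorem prefix_foldl_add {α : Type} [BEq α] (L : List α) (acc : List α) :
    acc <+: List.foldl PySem.Set.add acc L := by
  induction L generalizing acc with
  | nil => simp
  | cons x xs ih =>
    simp only [List.foldl_cons]
    refine List.IsPrefix.trans ?_ (ih (PySem.Set.add acc x))
    rw [PySem.Set.add]
    split
    · exact List.prefix_refl _
    · exact ⟨[x], rfl⟩

theorem drop_append_cons {α : Type} (a : List α) (x : α) (b : List α) :
    ((a ++ [x]) ++ b).drop a.length = x :: (((a ++ [x]) ++ b).drop (a ++ [x]).length) := by
  have h1 : ((a ++ [x]) ++ b).drop (a ++ [x]).length = b := List.drop_left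
  have h2 : ((a ++ [x]) ++ b).drop a.length = x :: b := by
    rw [List.append_assoc]; exact List.drop_left
  rw [h1, h2]

-- the inner loop's early-return value: find? over the new first occurrences, in order
theorem bInner_fst (T : List (List String)) (L : List String) (seen : PySem.Set String) :
    (bInnerLoop T L seen).1 =
      ((List.foldl PySem.Set.add seen L).drop seen.length).find? (bPred T) := by
  induction L generalizing seen with
  | nil => simp [bInnerLoop]
  | cons t rest ih =>
    simp only [bInnerLoop, List.foldl_cons]
    by_cases hc : PySem.Set.contains seen t = true
    · have hadd : PySem.Set.add seen t = seen := by rw [PySem.Set.add, if_pos hc]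
      rw [if_pos hc, hadd, ih seen]
    · have hadd : PySem.Set.add seen t = seen ++ [t] := by rw [PySem.Set.add, if_neg hc]
      rw [if_neg hc, hadd]
      obtain ⟨suf, hsuf⟩ := prefix_foldl_add rest (seen ++ [t])
      by_cases hp : (475 : Int) ≤ bTotalCount T t
      · rw [if_pos hp, ← hsuf, drop_append_cons, List.find?_cons]
        have hb : bPred T t = true := by simp [bPred, hp]
        rw [hb]
      · rw [if_neg hp, ih (seen ++ [t]), ← hsuf, drop_append_cons, List.find?_cons]
        have hb : bPred T t = false := by simp [bPred, hp]
        rw [hb]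

-- when nothing qualifies, the inner loop falls through with the updated seen set
theorem bInner_none (T : List (List String)) (L : List String) (seen : PySem.Set String)
    (h : ((List.foldl PySem.Set.add seen L).drop seen.length).find? (bPred T) = none) :
    bInnerLoop T L seen = (none, List.foldl PySem.Set.add seen L) := by
  induction L generalizing seen with
  | nil => simp [bInnerLoop]
  | cons t rest ih =>
    simp only [List.foldl_cons] at h ⊢
    simp only [bInnerLoop]
    by_cases hc : PySem.Set.contains seen t = true
    · have hadd : PySem.Set.add seen t = seen := by rw [PySem.Set.add, if_pos hc]
      rw [hadd] at h
      rw [if_pos hc, hadd]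
      exact ih seen h
    · have hadd : PySem.Set.add seen t = seen ++ [t] := by rw [PySem.Set.add, if_neg hc]
      rw [hadd] at h
      obtain ⟨suf, hsuf⟩ := prefix_foldl_add rest (seen ++ [t])
      rw [← hsuf, drop_append_cons] at h
      simp only [List.find?_cons] at h
      cases hbp : bPred T t with
      | true => rw [hbp] at h; simp at h
      | false =>
        rw [hbp] at h; simp at h
        have hp : ¬ (475 : Int) ≤ bTotalCount T t := by
          intro hp475; simp [bPred, hp475] at hbp
        rw [if_neg hc, hadd, if_neg hp]
        exact ih (seen ++ [t]) (by rw [← hsuf]; simpa using h)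

-- the outer loop = find? over the new first occurrences of the whole flattened input
theorem bOuterLoop_eq (T LL : List (List String)) (seen : PySem.Set String) :
    bOuterLoop T LL seen =
      ((List.foldl PySem.Set.add seen LL.flatten).drop seen.length).find? (bPred T) := by
  induction LL generalizing seen with
  | nil => simp [bOuterLoop]
  | cons ts rest ih =>
    simp only [bOuterLoop, List.flatten_cons, List.foldl_append]
    obtain ⟨mid, hmid⟩ := prefix_foldl_add ts seen
    obtain ⟨suf, hsuf⟩ := prefix_foldl_add rest.flatten (List.foldl PySem.Set.add seen ts)
    have hd1 : (List.foldl PySem.Set.add seen ts).drop seen.length = mid := by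
      rw [← hmid]; exact List.drop_left
    have hd2 : (List.foldl PySem.Set.add (List.foldl PySem.Set.add seen ts) rest.flatten).drop
        seen.length = mid ++ suf := by
      rw [← hsuf, ← hmid, List.append_assoc]; exact List.drop_left
    have hd3 : (List.foldl PySem.Set.add (List.foldl PySem.Set.add seen ts) rest.flatten).drop
        (List.foldl PySem.Set.add seen ts).length = suf := by
      rw [← hsuf]; exact List.drop_left
    rw [hd2, List.find?_append]
    cases hf : mid.find? (bPred T) with
    | some t =>
      have h1 : (bInnerLoop T ts seen).1 = some t := by rw [bInner_fst, hd1, hf]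
      rcases hpair : bInnerLoop T ts seen with ⟨o, s'⟩
      rw [hpair] at h1
      simp only at h1
      rw [h1]
      simp
    | none =>
      have h2 : bInnerLoop T ts seen = (none, List.foldl PySem.Set.add seen ts) :=
        bInner_none T ts seen (by rw [hd1]; exact hf)
      rw [h2]
      simp only [Option.none_or]
      exact (ih (List.foldl PySem.Set.add seen ts)).trans (by rw [hd3])

-- A's nested counting loop builds exactly Counter(flatten)
theorem count_dict_eq_counter (types_list : List (List String)) :
    types_list.foldl
      (fun d types => types.foldl (fun d t => d.modify t 0 (· + 1)) d)
      PySem.Dict.empty = PySem.Dict.counter types_list.flatten := by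
  rw [PySem.Dict.counter_eq_foldl, List.foldl_flatten]

-- the items loop is find? on the items list
theorem checkItemsLoop_eq_find? (l : List (String × Int)) :
    checkItemsLoop l = match l.find? (fun kv => (475 : Int) ≤ kv.2) with
      | some kv => kv.1
      | none => "no_type" := by
  induction l with
  | nil => rfl
  | cons kv rest ih =>
    obtain ⟨t, c⟩ := kv
    by_cases h : (475 : Int) ≤ c
    · simp [checkItemsLoop, h]
    · simp only [checkItemsLoop, List.find?_cons]
      simp [h, ih]

-- ===== VERDICT (by name: the statement is the Claim_ definition above) =====
theorem check_if_type_spec : Claim_equal_check_if_type := by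
  intro types_list _
  show check_if_type types_list = check_if_type_alt types_list
  -- A = checkItemsLoop on Counter(flatten).items = find? over set(flatten) of the count predicate
  have hA : check_if_type types_list
      = checkItemsLoop (PySem.Dict.counter types_list.flatten).items := by
    unfold check_if_type
    rw [count_dict_eq_counter]
  have hcomp : ((fun kv : String × Int => decide ((475 : Int) ≤ kv.2))
      ∘ (fun k => (k, (types_list.flatten.count k : Int))))
      = (fun t => decide ((475 : Int) ≤ (types_list.flatten.count t : Int))) := rfl
  have hpred : (fun t => decide ((475 : Int) ≤ (types_list.flatten.count t : Int)))
      = bPred types_list := by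
    funext t; simp [bPred, bTotalCount_eq]
  -- B = find? over set(flatten) of the same predicate
  have hB : check_if_type_alt types_list
      = match (PySem.Set.ofList types_list.flatten).find? (bPred types_list) with
        | some t => t
        | none => "no_type" := by
    unfold check_if_type_alt
    rw [bOuterLoop_eq]
    simp [PySem.Set.empty, PySem.Set.ofList_eq_foldl]
  rw [hA, checkItemsLoop_eq_find?, PySem.Dict.items_counter, List.find?_map, hcomp, hpred, hB]
  cases (PySem.Set.ofList types_list.flatten).find? (bPred types_list) <;> rfl
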